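-- pv_equiv track=rewrite | github.com/Decidish/decidish | mlpipeline/clean_recipe.py | verify_preference_list
-- ===== SOURCE A (Python) =====
-- from typing import Dict, Any, List, Set
--
-- def verify_preference_list(our_list: Dict, json_set: Set):
--     mark = []
--     for item in our_list.keys():
--         if item in json_set:
--             mark.append("True")
--         else:
--             mark.append("False")
--     positive = mark.count("True")
--     negative = mark.count("False")
--     return positive, negative
-- ===== SOURCE B (Python) =====
-- def verify_preference_list(our_list, json_set):
--     positive = len(our_list.keys() & json_set)
--     return positive, len(our_list) - positive
-- ===== Notes on version B (the rewrite author's own statement) =====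
-- stated objective: idiomatic
-- what changed: B replaces the per-key membership loop, the intermediate mark list of 'True'/'False' strings and the two .count scans with a single bulk set intersection of the dict key-view with json_set, deriving the negative count by subtraction from the dict size.
import Mathlib
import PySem

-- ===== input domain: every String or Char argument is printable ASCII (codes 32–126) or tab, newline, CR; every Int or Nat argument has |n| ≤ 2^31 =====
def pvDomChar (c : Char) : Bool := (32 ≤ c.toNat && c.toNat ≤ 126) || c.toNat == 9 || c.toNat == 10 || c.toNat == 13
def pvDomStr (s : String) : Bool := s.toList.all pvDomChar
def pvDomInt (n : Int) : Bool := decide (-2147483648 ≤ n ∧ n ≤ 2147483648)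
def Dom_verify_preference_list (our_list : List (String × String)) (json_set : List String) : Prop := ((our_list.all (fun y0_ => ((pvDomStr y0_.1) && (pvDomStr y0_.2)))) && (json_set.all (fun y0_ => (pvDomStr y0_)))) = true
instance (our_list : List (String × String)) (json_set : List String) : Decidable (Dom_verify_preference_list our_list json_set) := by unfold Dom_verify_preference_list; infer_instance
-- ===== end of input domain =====

-- ===== PORT A =====
-- A iterates over the dict's keys, marking "True"/"False" per membership in the set, then counts both.
def verify_preference_list (our_list : List (String × String)) (json_set : List String) : Int × Int :=
  let jset := PySem.Set.ofList json_set
  let mark := (PySem.Dict.ofList our_list).keys.foldl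
    (fun m item => if jset.contains item then m ++ ["True"] else m ++ ["False"]) []
  ((mark.count "True" : Int), (mark.count "False" : Int))

-- ===== PORT B =====
-- B: positive = len(our_list.keys() & json_set); negative = len(our_list) - positive.
def verify_preference_list_alt (our_list : List (String × String)) (json_set : List String) : Int × Int :=
  let d := PySem.Dict.ofList our_list
  let positive : Int := PySem.Set.len (PySem.Set.inter d.keys json_set)
  (positive, (d.size : Int) - positive)

-- ===== PRECONDITION & SPEC =====
def Spec_verify_preference_list (our_list : List (String × String)) (json_set : List String) (out : Int × Int) : Prop := out = verify_preference_list_alt our_list json_set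
instance (our_list : List (String × String)) (json_set : List String) (out : Int × Int) : Decidable (Spec_verify_preference_list our_list json_set out) := by unfold Spec_verify_preference_list; infer_instance

-- ===== CLAIM (what is proved, stated in full; the proofs are below) =====
def Claim_equal_verify_preference_list : Prop := ∀ (our_list : List (String × String)) (json_set : List String), Dom_verify_preference_list our_list json_set → Spec_verify_preference_list our_list json_set (verify_preference_list our_list json_set)

-- ===== LEMMAS AND PROOFS =====

-- Counting "True" in A's mark list accumulates the number of keys satisfying the predicate.
lemma count_true_foldl (p : String → Bool) (l acc : List String) :
    (l.foldl (fun m item => if p item then m ++ ["True"] else m ++ ["False"]) acc).count "True"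
      = acc.count "True" + l.countP p := by
  induction l generalizing acc with
  | nil => simp
  | cons x xs ih =>
    by_cases h : p x <;> simp [List.foldl_cons, h, ih, List.count_append] <;> omega

-- Counting "False" accumulates the number of keys failing the predicate.
lemma count_false_foldl (p : String → Bool) (l acc : List String) :
    (l.foldl (fun m item => if p item then m ++ ["True"] else m ++ ["False"]) acc).count "False"
      = acc.count "False" + l.countP (fun x => !p x) := by
  induction l generalizing acc with
  | nil => simp
  | cons x xs ih =>
    by_cases h : p x <;> simp [List.foldl_cons, h, ih, List.count_append] <;> omega

-- Membership test against set(json_set) agrees with membership in the raw list.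
lemma contains_ofList (l : List String) (x : String) :
    List.contains (PySem.Set.ofList l) x = List.contains l x := by
  simp [PySem.Set.mem_ofList]

-- ===== VERDICT (by name: the statement is the Claim_ definition above) =====
theorem verify_preference_list_spec : Claim_equal_verify_preference_list := by
  intro our_list json_set _
  unfold Spec_verify_preference_list verify_preference_list verify_preference_list_alt
  simp only [PySem.Set.inter, PySem.Set.len, PySem.Dict.size]
  rw [count_true_foldl (fun item => PySem.Set.contains (PySem.Set.ofList json_set) item)
        (PySem.Dict.ofList our_list).keys [],
      count_false_foldl (fun item => PySem.Set.contains (PySem.Set.ofList json_set) item)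
        (PySem.Dict.ofList our_list).keys []]
  simp only [PySem.Set.contains, contains_ofList, List.count_nil, Nat.zero_add,
    List.countP_eq_length_filter]
  have hlen : ((PySem.Dict.ofList our_list).keys.length)
      = ((PySem.Dict.ofList our_list).items.length) := by
    simp [PySem.Dict.keys]
  have h := List.length_eq_countP_add_countP (p := fun x => List.contains json_set x)
    (l := (PySem.Dict.ofList our_list).keys)
  simp only [List.countP_eq_length_filter, decide_not,
    Bool.decide_eq_true] at h ⊢
  apply Prod.ext <;> push_cast <;> omega
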